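-- pv_equiv track=rewrite | github.com/vv79/tic-tac-toe | script.py | init_table
-- ===== SOURCE A (Python) =====
-- def init_table(n):
--     table = []
--     counter = 0
--     for i in range(n):
--         row = []
--         for j in range(n):
--             counter += 1
--             row.append(str(counter))
--         table.append(row)
--     return table
-- ===== SOURCE B (Python) =====
-- def init_table(n):
--     if n <= 0:
--         return []
--     nums = [str(k) for k in range(1, n * n + 1)]
--     return [nums[i * n:(i + 1) * n] for i in range(n)]
-- ===== Notes on version B (the rewrite author's own statement) =====
-- stated objective: alternative
-- what changed: Replaces A's stateful running counter with nested appends by a two-phase flat construction: build the whole list of number strings once, then partition it into rows by slicing.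
import Mathlib
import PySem

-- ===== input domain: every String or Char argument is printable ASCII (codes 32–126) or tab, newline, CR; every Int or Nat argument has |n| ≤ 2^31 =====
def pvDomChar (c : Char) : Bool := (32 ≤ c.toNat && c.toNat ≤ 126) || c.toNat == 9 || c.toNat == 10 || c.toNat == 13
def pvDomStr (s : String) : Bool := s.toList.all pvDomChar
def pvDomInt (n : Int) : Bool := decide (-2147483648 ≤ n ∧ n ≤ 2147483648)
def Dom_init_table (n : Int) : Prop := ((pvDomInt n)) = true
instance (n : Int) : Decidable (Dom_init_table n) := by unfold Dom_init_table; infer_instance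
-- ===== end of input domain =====

-- B replaces A's running counter and nested appends by building the flat list of
-- number strings once and partitioning it into rows by slicing (objective: alternative).

-- ===== PORT A =====
def init_table (n : Int) : List (List String) :=
  let st := (PySem.List.pyRange 0 n 1).foldl
    (fun (st : List (List String) × Int) _i =>
      let rc := (PySem.List.pyRange 0 n 1).foldl
        (fun (rc : List String × Int) _j =>
          (rc.1 ++ [PySem.Int.toStr (rc.2 + 1)], rc.2 + 1))
        ([], st.2)
      (st.1 ++ [rc.1], rc.2))
    ([], 0)
  st.1

-- ===== PORT B =====
def init_table_alt (n : Int) : List (List String) :=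
  if n ≤ 0 then [] else
  let nums := (PySem.List.pyRange 1 (n * n + 1) 1).map PySem.Int.toStr
  (PySem.List.pyRange 0 n 1).map
    (fun i => PySem.List.slice nums (some (i * n)) (some ((i + 1) * n)))

-- ===== PRECONDITION & SPEC =====
def Spec_init_table (n : Int) (out : List (List String)) : Prop := out = init_table_alt n
instance (n : Int) (out : List (List String)) : Decidable (Spec_init_table n out) := by unfold Spec_init_table; infer_instance

-- ===== CLAIM (what is proved, stated in full; the proofs are below) =====
def Claim_equal_init_table : Prop := ∀ (n : Int), Dom_init_table n → Spec_init_table n (init_table n)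

-- ===== LEMMAS AND PROOFS =====

-- A's inner loop: appends str(c+1), …, str(c+len) to the row, counter ends at c+len.
theorem innerA (l : List Int) (r : List String) (c : Int) :
    l.foldl (fun (rc : List String × Int) _ =>
      (rc.1 ++ [PySem.Int.toStr (rc.2 + 1)], rc.2 + 1)) (r, c)
    = (r ++ (List.range l.length).map (fun j : Nat => PySem.Int.toStr (c + (j : Int) + 1)),
       c + l.length) := by
  induction l generalizing r c with
  | nil => simp
  | cons x t ih =>
    simp only [List.foldl_cons, ih, List.length_cons, List.range_succ_eq_map,
      List.map_cons, List.map_map]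
    simp only [Prod.mk.injEq]
    constructor
    · simp only [List.append_assoc, List.singleton_append]
      congr 1
      congr 1
      · norm_num
      · apply List.map_congr_left
        intro j _
        congr 1
        push_cast
        ring
    · push_cast
      ring

-- A's outer loop as a map of closed-form rows.
theorem outerA (l inner : List Int) (t : List (List String)) (c : Int) :
    l.foldl (fun (st : List (List String) × Int) _ =>
      let rc := inner.foldl (fun (rc : List String × Int) _ =>
        (rc.1 ++ [PySem.Int.toStr (rc.2 + 1)], rc.2 + 1)) ([], st.2)
      (st.1 ++ [rc.1], rc.2)) (t, c)
    = (t ++ (List.range l.length).map (fun i : Nat =>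
         (List.range inner.length).map (fun j : Nat =>
           PySem.Int.toStr (c + (i : Int) * inner.length + (j : Int) + 1))),
       c + l.length * inner.length) := by
  induction l generalizing t c with
  | nil => simp
  | cons x tl ih =>
    rw [List.foldl_cons]
    have hstep : (let rc := inner.foldl (fun (rc : List String × Int) _ =>
          (rc.1 ++ [PySem.Int.toStr (rc.2 + 1)], rc.2 + 1)) ([], (t, c).2);
        ((t, c).1 ++ [rc.1], rc.2))
        = (t ++ [(List.range inner.length).map
            (fun j : Nat => PySem.Int.toStr (c + (j : Int) + 1))],
           c + (inner.length : Int)) := by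
      simp [innerA]
    rw [hstep, ih]
    simp only [Prod.mk.injEq, List.length_cons, List.range_succ_eq_map,
      List.map_cons, List.map_map]
    constructor
    · simp only [List.append_assoc, List.singleton_append]
      congr 1
      congr 1
      · apply List.map_congr_left
        intro j _
        congr 1
        push_cast
        ring
      · apply List.map_congr_left
        intro i _
        apply List.map_congr_left
        intro j _
        congr 1
        push_cast
        ring
    · push_cast
      ring

theorem init_table_closed (m : Nat) :
    init_table (m : Int)
    = (List.range m).map (fun i : Nat => (List.range m).map (fun j : Nat =>
        PySem.Int.toStr ((i : Int) * m + (j : Int) + 1))) := by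
  unfold init_table
  rw [outerA]
  simp only [PySem.List.length_pyRange_one, Int.sub_zero, Int.toNat_natCast]
  apply List.map_congr_left
  intro i _
  apply List.map_congr_left
  intro j _
  congr 1
  norm_num

theorem init_table_alt_closed (m : Nat) :
    init_table_alt (m : Int)
    = (List.range m).map (fun i : Nat => (List.range m).map (fun j : Nat =>
        PySem.Int.toStr ((i : Int) * m + (j : Int) + 1))) := by
  unfold init_table_alt
  rcases Nat.eq_zero_or_pos m with hm | hm
  · subst hm; simp
  · rw [if_neg (by omega)]
    rw [PySem.List.pyRange_one 1 ((m : Int) * m + 1), PySem.List.pyRange_one 0 (m : Int)]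
    simp only [List.map_map, Int.sub_zero, Int.toNat_natCast]
    have hlen : ((m : Int) * m + 1 - 1).toNat = m * m := by
      omega
    rw [hlen]
    apply List.map_congr_left
    intro i hi
    simp only [Function.comp]
    have h1 : (0 + (i : Int)) * m = ((i * m : Nat) : Int) := by push_cast; ring
    have h2 : (0 + (i : Int) + 1) * m = ((i * m + m : Nat) : Int) := by push_cast; ring
    rw [h1, h2]
    have h3 : ((i * m + m : Nat) : Int) = ((i * m : Nat) : Int) + ((m : Nat) : Int) := by
      push_cast; ring
    rw [h3, PySem.List.slice_natCast_add]
    rw [← List.map_drop, ← List.map_take]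
    rw [List.range_eq_range', List.drop_range']
    have hi' : i < m := List.mem_range.mp hi
    have hle : m ≤ m * m - i * m := by
      have : i * m + m ≤ m * m := by nlinarith
      omega
    rw [List.take_range'_of_length_ge hle]
    have hs : 0 + i * m * 1 = i * m := by ring
    rw [hs, List.range'_eq_map_range]
    simp only [List.map_map]
    apply List.map_congr_left
    intro j hj
    simp only [Function.comp]
    congr 1
    push_cast
    ring

-- ===== VERDICT (by name: the statement is the Claim_ definition above) =====
theorem init_table_spec : Claim_equal_init_table := by
  intro n _
  unfold Spec_init_table
  rcases le_or_gt n 0 with h | h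
  · have ha : PySem.List.pyRange 0 n 1 = [] := PySem.List.pyRange_one_eq_nil h
    simp [init_table, init_table_alt, ha, h]
  · obtain ⟨m, rfl⟩ : ∃ m : Nat, n = (m : Int) :=
      ⟨n.toNat, (Int.toNat_of_nonneg h.le).symm⟩
    rw [init_table_closed, init_table_alt_closed]
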